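-- pv_equiv track=rewrite | github.com/ssd227/sgd_nlp | core/embedding/submodule/corpus_factory.py | window_sample
-- ===== SOURCE A (Python) =====
-- def window_sample(tokens: list, win_width=5):
--     # 返回tokens中，中心词和周围词的词对
--     res = []
--     half_win = win_width // 2
--
--     for ci in range(len(tokens)):
--         cur_context_w = tokens[max(ci - half_win, 0):ci] + tokens[ci + 1:ci + half_win + 1]
--         cur_w_pairs = [[tokens[ci], cont_w] for cont_w in cur_context_w]
--         res += cur_w_pairs
--     return res
-- ===== SOURCE B (Python) =====
-- def window_sample(tokens: list, win_width=5):
--     # Offset-major: one pass per context distance, collected into per-center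
--     # buckets, flattened at the end (left offsets farthest-first so each
--     # bucket ends up in left-to-right order). Distances beyond n-1 cannot
--     # produce a pair, so the distance range is clamped to n-1.
--     n = len(tokens)
--     half_win = win_width // 2
--     dmax = min(half_win, n - 1)
--     buckets = [[] for _ in range(n)]
--     for d in range(dmax, 0, -1):              # left neighbours at distance d
--         for ci in range(d, n):
--             buckets[ci].append([tokens[ci], tokens[ci - d]])
--     for d in range(1, dmax + 1):              # right neighbours at distance d
--         for ci in range(n - d):
--             buckets[ci].append([tokens[ci], tokens[ci + d]])
--     res = []
--     for b in buckets:
--         res += b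
--     return res
-- ===== Notes on version B (the rewrite author's own statement) =====
-- stated objective: alternative
-- what changed: Replaces the center-major pass (per-center slice concatenation) by two offset-major passes, one per context distance, that fill per-center buckets which are flattened at the end.
-- intended difference: For win_width <= -3 with len(tokens) > -(win_width//2), A's negative slice stop wraps around and returns spurious [center, right-neighbour] pairs, while B returns the intended empty list since a non-positive window has no context. — e.g. on window_sample(["a", "b", "c", "d"], -3): A returns [["a", "b"], ["a", "c"]], B returns []
import Mathlib
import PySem

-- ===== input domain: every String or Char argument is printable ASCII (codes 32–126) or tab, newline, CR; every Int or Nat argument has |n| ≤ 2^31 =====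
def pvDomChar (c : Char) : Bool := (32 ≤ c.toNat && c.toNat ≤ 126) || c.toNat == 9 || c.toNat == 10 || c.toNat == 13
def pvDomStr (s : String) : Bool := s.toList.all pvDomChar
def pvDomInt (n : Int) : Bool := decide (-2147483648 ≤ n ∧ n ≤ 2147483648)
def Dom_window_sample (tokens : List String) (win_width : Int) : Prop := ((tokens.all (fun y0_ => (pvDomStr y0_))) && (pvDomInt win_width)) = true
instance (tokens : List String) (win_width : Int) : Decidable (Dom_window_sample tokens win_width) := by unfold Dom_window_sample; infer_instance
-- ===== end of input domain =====

-- B replaces A's center-major slicing pass by two offset-major passes filling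
-- per-center buckets, flattened at the end (alternative decomposition, same cost);
-- return value only, no mutation.

-- ===== PORT A =====
def window_sample (tokens : List String) (win_width : Int) : List (List String) :=
  (PySem.List.pyRange 0 (PySem.List.len tokens)).foldl (fun res ci =>
    res ++ (PySem.List.slice tokens (some (max (ci - PySem.Int.floordiv win_width 2) 0)) (some ci)
      ++ PySem.List.slice tokens (some (ci + 1)) (some (ci + PySem.Int.floordiv win_width 2 + 1))).map
      (fun contW => [PySem.List.pyGetD tokens ci "", contW])) []

-- ===== PORT B =====
-- buckets[ci].append(...) is ported with List.modify ci.toNat; exact, since every ci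
-- produced by the two loops is nonnegative (ci ≥ d ≥ 1 resp. ci ≥ 0).
def window_sample_alt (tokens : List String) (win_width : Int) : List (List String) :=
  let n := PySem.List.len tokens
  let h := PySem.Int.floordiv win_width 2
  let dmax := min h (n - 1)
  let buckets0 : List (List (List String)) := (PySem.List.pyRange 0 n).map (fun _ => [])
  let buckets1 := (PySem.List.pyRange dmax 0 (-1)).foldl (fun bk d =>
    (PySem.List.pyRange d n).foldl (fun bk ci =>
      bk.modify ci.toNat (fun l =>
        l ++ [[PySem.List.pyGetD tokens ci "", PySem.List.pyGetD tokens (ci - d) ""]])) bk) buckets0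
  let buckets2 := (PySem.List.pyRange 1 (dmax + 1)).foldl (fun bk d =>
    (PySem.List.pyRange 0 (n - d)).foldl (fun bk ci =>
      bk.modify ci.toNat (fun l =>
        l ++ [[PySem.List.pyGetD tokens ci "", PySem.List.pyGetD tokens (ci + d) ""]])) bk) buckets1
  buckets2.foldl (fun res b => res ++ b) []

-- ===== PRECONDITION & SPEC =====
-- For win_width ≤ -3 with len(tokens) > -(win_width//2), A's negative slice stop wraps
-- around and returns spurious [center, right-neighbour] pairs, while B returns the
-- intended empty list since a non-positive window has no context.
def D_window_sample (tokens : List String) (win_width : Int) : Prop :=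
  PySem.Int.floordiv win_width 2 ≤ -2 ∧ -(PySem.Int.floordiv win_width 2) < (tokens.length : Int)
instance (tokens : List String) (win_width : Int) : Decidable (D_window_sample tokens win_width) := by unfold D_window_sample; infer_instance

def Spec_window_sample (tokens : List String) (win_width : Int) (out : List (List String)) : Prop :=
  ¬ D_window_sample tokens win_width → out = window_sample_alt tokens win_width
instance (tokens : List String) (win_width : Int) (out : List (List String)) : Decidable (Spec_window_sample tokens win_width out) := by unfold Spec_window_sample; infer_instance

def pvDiffWitness_window_sample : List String × Int := (["a", "b", "c", "d"], -3)
def pvDiffWitnessOut_window_sample : (List (List String)) × (List (List String)) :=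
  ([["a", "b"], ["a", "c"]], [])

-- ===== CLAIM (what is proved, stated in full; the proofs are below) =====
def Claim_unchanged_window_sample : Prop := ∀ (tokens : List String) (win_width : Int), Dom_window_sample tokens win_width → Spec_window_sample tokens win_width (window_sample tokens win_width)
def Claim_changed_window_sample : Prop := Dom_window_sample (pvDiffWitness_window_sample.1) (pvDiffWitness_window_sample.2) ∧ D_window_sample (pvDiffWitness_window_sample.1) (pvDiffWitness_window_sample.2) ∧ window_sample (pvDiffWitness_window_sample.1) (pvDiffWitness_window_sample.2) = pvDiffWitnessOut_window_sample.1 ∧ window_sample_alt (pvDiffWitness_window_sample.1) (pvDiffWitness_window_sample.2) = pvDiffWitnessOut_window_sample.2 ∧ pvDiffWitnessOut_window_sample.1 ≠ pvDiffWitnessOut_window_sample.2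
def Claim_exact_window_sample : Prop := ∀ (tokens : List String) (win_width : Int), Dom_window_sample tokens win_width → D_window_sample tokens win_width → window_sample tokens win_width ≠ window_sample_alt tokens win_width

-- ===== LEMMAS AND PROOFS =====

-- a nonnegative-bounds slice is the map of pyGetD over the clipped index range
lemma slice_eq_map_pyGetD (xs : List String) (a b : Int) (ha : 0 ≤ a) (hb : 0 ≤ b) :
    PySem.List.slice xs (some a) (some b)
      = (PySem.List.pyRange a (min b (xs.length : Int))).map (fun j => PySem.List.pyGetD xs j "") := by
  rw [PySem.List.slice_toNat xs ha hb]
  apply List.ext_getElem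
  · simp only [List.length_take, List.length_drop, List.length_map, PySem.List.length_pyRange_one]
    omega
  · intro k h1 h2
    simp only [List.length_take, List.length_drop] at h1
    simp only [List.length_map, PySem.List.length_pyRange_one] at h2
    simp only [List.getElem_take, List.getElem_drop, List.getElem_map]
    rw [PySem.List.getElem_pyRange_one]
    rw [PySem.List.pyGetD_eq_getElem xs "" (by omega) (by omega)]
    congr 1
    omega

-- modifying one nonnegative index of a range-indexed table, pointwise
lemma modify_map_pyRange {X : Type} (n i : Int) (hi : 0 ≤ i) (f : Int → X) (u : X → X) :
    ((PySem.List.pyRange 0 n).map f).modify i.toNat u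
      = (PySem.List.pyRange 0 n).map (fun ci => if ci = i then u (f ci) else f ci) := by
  by_cases hin : i < n
  · apply List.ext_getElem
    · simp [List.length_modify]
    · intro k h1 h2
      rw [List.getElem_modify]
      simp only [List.length_modify, List.length_map, PySem.List.length_pyRange_one] at h1
      simp only [List.getElem_map, PySem.List.getElem_pyRange_one]
      split_ifs with hik hci hci
      · rfl
      · exfalso; apply hci; omega
      · exfalso; apply hik; omega
      · rfl
  · rw [List.modify_eq_self (by simp only [List.length_map, PySem.List.length_pyRange_one]; omega)]
    apply List.map_congr_left
    intro ci hci
    rw [PySem.List.mem_pyRange_one] at hci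
    have hc : ¬ci = i := by omega
    rw [if_neg hc]

-- one inner pass: appending w ci to every bucket with index in [a, b)
lemma inner_pass {X : Type} (n b : Int) (w : Int → List X) :
    ∀ (k : Nat) (a : Int) (f : Int → List X), 0 ≤ a → (b - a).toNat ≤ k →
    (PySem.List.pyRange a b).foldl (fun bk ci => bk.modify ci.toNat (fun l => l ++ w ci))
        ((PySem.List.pyRange 0 n).map f)
      = (PySem.List.pyRange 0 n).map
          (fun ci => if a ≤ ci ∧ ci < b then f ci ++ w ci else f ci) := by
  intro k
  induction k with
  | zero =>
    intro a f ha hk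
    rw [PySem.List.pyRange_one_eq_nil (show b ≤ a by omega)]
    simp only [List.foldl_nil]
    apply List.map_congr_left
    intro ci _
    have hc : ¬(a ≤ ci ∧ ci < b) := by omega
    rw [if_neg hc]
  | succ k ih =>
    intro a f ha hk
    by_cases hab : b ≤ a
    · rw [PySem.List.pyRange_one_eq_nil (show b ≤ a from hab)]
      simp only [List.foldl_nil]
      apply List.map_congr_left
      intro ci _
      have hc : ¬(a ≤ ci ∧ ci < b) := by omega
      rw [if_neg hc]
    · rw [PySem.List.pyRange_one_cons (show a < b by omega)]
      simp only [List.foldl_cons]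
      rw [modify_map_pyRange n a ha f (fun l => l ++ w a)]
      rw [ih (a + 1) _ (by omega) (by omega)]
      apply List.map_congr_left
      intro ci _
      by_cases hca : ci = a
      · rw [hca]
        have h1 : ¬(a + 1 ≤ a ∧ a < b) := by omega
        have h2 : a ≤ a ∧ a < b := by omega
        rw [if_neg h1, if_pos h2, if_pos rfl]
      · rw [if_neg hca]
        by_cases hc : a + 1 ≤ ci ∧ ci < b
        · have h2 : a ≤ ci ∧ ci < b := by omega
          rw [if_pos hc, if_pos h2]
        · have h2 : ¬(a ≤ ci ∧ ci < b) := by omega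
          rw [if_neg hc, if_neg h2]

-- the whole offset-major pass: each bucket collects its pairs, in offset order
lemma outer_pass {X : Type} (n : Int) (lo hi : Int → Int) (v : Int → Int → X) :
    ∀ (ds : List Int) (f : Int → List X), (∀ d ∈ ds, 0 ≤ lo d) →
    ds.foldl (fun bk d =>
        (PySem.List.pyRange (lo d) (hi d)).foldl (fun bk ci =>
          bk.modify ci.toNat (fun l => l ++ [v d ci])) bk)
      ((PySem.List.pyRange 0 n).map f)
      = (PySem.List.pyRange 0 n).map (fun ci =>
          f ci ++ (ds.filter (fun d => decide (lo d ≤ ci ∧ ci < hi d))).map (fun d => v d ci)) := by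
  intro ds
  induction ds with
  | nil =>
    intro f _
    simp
  | cons d ds ih =>
    intro f hlo
    simp only [List.foldl_cons]
    rw [inner_pass n (hi d) (fun ci => [v d ci]) (hi d - lo d).toNat (lo d) f
      (hlo d (List.mem_cons_self)) le_rfl]
    rw [ih _ (fun e he => hlo e (List.mem_cons_of_mem d he))]
    apply List.map_congr_left
    intro ci _
    simp only [List.filter_cons]
    by_cases hc : lo d ≤ ci ∧ ci < hi d
    · rw [if_pos hc, if_pos (by simpa using hc)]
      simp [List.append_assoc]
    · rw [if_neg hc, if_neg (by simpa using hc)]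

-- folding (· ++ ·) over a list of lists is flatten
lemma foldl_append_flatten {X : Type} (l : List (List X)) :
    ∀ (init : List X), l.foldl (fun res b => res ++ b) init = init ++ l.flatten := by
  induction l with
  | nil => intro init; simp
  | cons x xs ih => intro init; simp [ih, List.append_assoc]

-- B flattened as a flatMap of per-center contents
lemma alt_eq_flatMap (tokens : List String) (win_width : Int) :
    window_sample_alt tokens win_width
      = (PySem.List.pyRange 0 (PySem.List.len tokens)).flatMap (fun ci =>
          (((PySem.List.pyRange (min (PySem.Int.floordiv win_width 2) (PySem.List.len tokens - 1)) 0 (-1)).filter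
              (fun d => decide (d ≤ ci ∧ ci < PySem.List.len tokens))).map
            (fun d => [PySem.List.pyGetD tokens ci "", PySem.List.pyGetD tokens (ci - d) ""]))
          ++ ((PySem.List.pyRange 1 (min (PySem.Int.floordiv win_width 2) (PySem.List.len tokens - 1) + 1)).filter
              (fun d => decide (0 ≤ ci ∧ ci < PySem.List.len tokens - d))).map
            (fun d => [PySem.List.pyGetD tokens ci "", PySem.List.pyGetD tokens (ci + d) ""])) := by
  unfold window_sample_alt
  simp only []
  rw [outer_pass (PySem.List.len tokens) (fun d => d) (fun _ => PySem.List.len tokens)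
    (fun d ci => [PySem.List.pyGetD tokens ci "", PySem.List.pyGetD tokens (ci - d) ""])
    (PySem.List.pyRange (min (PySem.Int.floordiv win_width 2) (PySem.List.len tokens - 1)) 0 (-1)) (fun _ => [])
    (by intro d hd; rw [PySem.List.mem_pyRange_neg_one] at hd; show (0:Int) ≤ d; omega)]
  rw [outer_pass (PySem.List.len tokens) (fun _ => 0) (fun d => PySem.List.len tokens - d)
    (fun d ci => [PySem.List.pyGetD tokens ci "", PySem.List.pyGetD tokens (ci + d) ""])
    (PySem.List.pyRange 1 (min (PySem.Int.floordiv win_width 2) (PySem.List.len tokens - 1) + 1)) _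
    (by intro d _; show (0:Int) ≤ 0; omega)]
  rw [foldl_append_flatten]
  simp only [List.nil_append, ← List.flatMap_def]

-- A's per-center context vanishes when the half window is negative (and, below -1, tokens are short)
lemma percenter_nil (tokens : List String) (h ci : Int) (hh : h ≤ -1)
    (hn : (tokens.length : Int) ≤ -h ∨ h = -1) (hci0 : 0 ≤ ci) :
    (PySem.List.slice tokens (some (max (ci - h) 0)) (some ci)
      ++ PySem.List.slice tokens (some (ci + 1)) (some (ci + h + 1))) = [] := by
  have l1 : (PySem.List.slice tokens (some (max (ci - h) 0)) (some ci)).length = 0 := by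
    rw [PySem.List.length_slice]
    simp only [PySem.List.clampIdx]
    split_ifs <;> omega
  have l2 : (PySem.List.slice tokens (some (ci + 1)) (some (ci + h + 1))).length = 0 := by
    rw [PySem.List.length_slice]
    simp only [PySem.List.clampIdx]
    split_ifs <;> omega
  rw [List.length_eq_zero_iff] at l1 l2
  rw [l1, l2]
  rfl

lemma alt_eq_nil_of_neg (tokens : List String) (win_width : Int)
    (hh : PySem.Int.floordiv win_width 2 ≤ -1) :
    window_sample_alt tokens win_width = [] := by
  rw [alt_eq_flatMap]
  rw [PySem.List.pyRange_neg_one_eq_nil (by omega)]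
  rw [PySem.List.pyRange_one_eq_nil (by omega)]
  simp

-- the left bucket contents equal A's left slice, mapped
lemma left_eq (tokens : List String) (h ci : Int) (hh : 0 ≤ h) (hci0 : 0 ≤ ci)
    (hcin : ci < (tokens.length : Int)) :
    ((PySem.List.pyRange (min h ((tokens.length : Int) - 1)) 0 (-1)).filter
        (fun d => decide (d ≤ ci ∧ ci < (tokens.length : Int)))).map
      (fun d => [PySem.List.pyGetD tokens ci "", PySem.List.pyGetD tokens (ci - d) ""])
    = (PySem.List.slice tokens (some (max (ci - h) 0)) (some ci)).map
        (fun contW => [PySem.List.pyGetD tokens ci "", contW]) := by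
  rw [slice_eq_map_pyGetD tokens _ ci (by omega) (by omega), List.map_map]
  rw [PySem.List.pyRange_neg_one_eq_reverse]
  have hmin : min ci (tokens.length : Int) = ci := by omega
  rw [hmin]
  rw [List.filter_reverse]
  have hsplit : PySem.List.pyRange (0 + 1) (min h ((tokens.length : Int) - 1) + 1)
      = PySem.List.pyRange 1 (min (h + 1) (ci + 1))
        ++ PySem.List.pyRange (min (h + 1) (ci + 1)) (min h ((tokens.length : Int) - 1) + 1) := by
    rw [← PySem.List.pyRange_one_append 1 (min (h + 1) (ci + 1)) (min h ((tokens.length : Int) - 1) + 1)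
      (by omega) (by omega)]
    norm_num
  rw [hsplit, List.filter_append]
  have f1 : (PySem.List.pyRange 1 (min (h + 1) (ci + 1))).filter
      (fun d => decide (d ≤ ci ∧ ci < (tokens.length : Int)))
      = PySem.List.pyRange 1 (min (h + 1) (ci + 1)) := by
    rw [List.filter_eq_self]
    intro d hd
    rw [PySem.List.mem_pyRange_one] at hd
    simp only [decide_eq_true_eq]
    omega
  have f2 : (PySem.List.pyRange (min (h + 1) (ci + 1)) (min h ((tokens.length : Int) - 1) + 1)).filter
      (fun d => decide (d ≤ ci ∧ ci < (tokens.length : Int))) = [] := by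
    rw [List.filter_eq_nil_iff]
    intro d hd
    rw [PySem.List.mem_pyRange_one] at hd
    simp only [decide_eq_true_eq]
    omega
  rw [f1, f2, List.append_nil]
  apply List.ext_getElem
  · simp only [List.length_map, List.length_reverse, PySem.List.length_pyRange_one]
    omega
  · intro k h1 h2
    simp only [List.length_map, List.length_reverse, PySem.List.length_pyRange_one] at h1 h2
    simp only [List.getElem_map, List.getElem_reverse, PySem.List.getElem_pyRange_one,
      PySem.List.length_pyRange_one]
    congr 2
    exact congrArg (fun j => PySem.List.pyGetD tokens j "") (by omega)

-- the right bucket contents equal A's right slice, mapped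
lemma right_eq (tokens : List String) (h ci : Int) (hh : 0 ≤ h) (hci0 : 0 ≤ ci)
    (hcin : ci < (tokens.length : Int)) :
    ((PySem.List.pyRange 1 (min h ((tokens.length : Int) - 1) + 1)).filter
        (fun d => decide (0 ≤ ci ∧ ci < (tokens.length : Int) - d))).map
      (fun d => [PySem.List.pyGetD tokens ci "", PySem.List.pyGetD tokens (ci + d) ""])
    = (PySem.List.slice tokens (some (ci + 1)) (some (ci + h + 1))).map
        (fun contW => [PySem.List.pyGetD tokens ci "", contW]) := by
  rw [slice_eq_map_pyGetD tokens _ (ci + h + 1) (by omega) (by omega), List.map_map]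
  have hsplit : PySem.List.pyRange 1 (min h ((tokens.length : Int) - 1) + 1)
      = PySem.List.pyRange 1 (min (h + 1) ((tokens.length : Int) - ci))
        ++ PySem.List.pyRange (min (h + 1) ((tokens.length : Int) - ci)) (min h ((tokens.length : Int) - 1) + 1) := by
    rw [← PySem.List.pyRange_one_append 1 (min (h + 1) ((tokens.length : Int) - ci)) (min h ((tokens.length : Int) - 1) + 1)
      (by omega) (by omega)]
  rw [hsplit, List.filter_append]
  have f1 : (PySem.List.pyRange 1 (min (h + 1) ((tokens.length : Int) - ci))).filter
      (fun d => decide (0 ≤ ci ∧ ci < (tokens.length : Int) - d))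
      = PySem.List.pyRange 1 (min (h + 1) ((tokens.length : Int) - ci)) := by
    rw [List.filter_eq_self]
    intro d hd
    rw [PySem.List.mem_pyRange_one] at hd
    simp only [decide_eq_true_eq]
    omega
  have f2 : (PySem.List.pyRange (min (h + 1) ((tokens.length : Int) - ci)) (min h ((tokens.length : Int) - 1) + 1)).filter
      (fun d => decide (0 ≤ ci ∧ ci < (tokens.length : Int) - d)) = [] := by
    rw [List.filter_eq_nil_iff]
    intro d hd
    rw [PySem.List.mem_pyRange_one] at hd
    simp only [decide_eq_true_eq]
    omega
  rw [f1, f2, List.append_nil]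
  apply List.ext_getElem
  · simp only [List.length_map, PySem.List.length_pyRange_one]
    omega
  · intro k h1 h2
    simp only [List.length_map, PySem.List.length_pyRange_one] at h1 h2
    simp only [List.getElem_map, PySem.List.getElem_pyRange_one]
    congr 2
    exact congrArg (fun j => PySem.List.pyGetD tokens j "") (by omega)

-- ===== VERDICT (by name: the statement is the Claim_ definition above) =====
theorem window_sample_spec : Claim_unchanged_window_sample := by
  intro tokens win_width _ hnD
  by_cases hh : 0 ≤ PySem.Int.floordiv win_width 2
  · rw [alt_eq_flatMap]
    unfold window_sample
    have step : ∀ (acc : List (List String)), ∀ ci ∈ PySem.List.pyRange 0 (PySem.List.len tokens),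
        (acc ++ (PySem.List.slice tokens (some (max (ci - PySem.Int.floordiv win_width 2) 0)) (some ci)
          ++ PySem.List.slice tokens (some (ci + 1)) (some (ci + PySem.Int.floordiv win_width 2 + 1))).map
          (fun contW => [PySem.List.pyGetD tokens ci "", contW]))
        = acc ++ ((((PySem.List.pyRange (min (PySem.Int.floordiv win_width 2) (PySem.List.len tokens - 1)) 0 (-1)).filter
              (fun d => decide (d ≤ ci ∧ ci < PySem.List.len tokens))).map
            (fun d => [PySem.List.pyGetD tokens ci "", PySem.List.pyGetD tokens (ci - d) ""]))
          ++ ((PySem.List.pyRange 1 (min (PySem.Int.floordiv win_width 2) (PySem.List.len tokens - 1) + 1)).filter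
              (fun d => decide (0 ≤ ci ∧ ci < PySem.List.len tokens - d))).map
            (fun d => [PySem.List.pyGetD tokens ci "", PySem.List.pyGetD tokens (ci + d) ""])) := by
      intro acc ci hci
      rw [PySem.List.mem_pyRange_one, PySem.List.len_eq] at hci
      rw [List.map_append]
      -- the two sides differ only by `len tokens` vs the cast, which are defeq
      exact congrArg (acc ++ ·) (congrArg₂ (· ++ ·)
        (left_eq tokens _ ci hh hci.1 hci.2).symm (right_eq tokens _ ci hh hci.1 hci.2).symm)
    rw [PySem.List.foldl_congr_mem _ _ _ [] step]
    rw [PySem.List.foldl_append_eq_flatMap]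
    simp
  · have hh' : PySem.Int.floordiv win_width 2 ≤ -1 := by omega
    rw [alt_eq_nil_of_neg tokens win_width hh']
    unfold window_sample
    have hn : (tokens.length : Int) ≤ -(PySem.Int.floordiv win_width 2) ∨ PySem.Int.floordiv win_width 2 = -1 := by
      unfold D_window_sample at hnD
      by_cases he : PySem.Int.floordiv win_width 2 = -1
      · right; exact he
      · left; omega
    have step : ∀ (acc : List (List String)), ∀ ci ∈ PySem.List.pyRange 0 (PySem.List.len tokens),
        (acc ++ (PySem.List.slice tokens (some (max (ci - PySem.Int.floordiv win_width 2) 0)) (some ci)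
          ++ PySem.List.slice tokens (some (ci + 1)) (some (ci + PySem.Int.floordiv win_width 2 + 1))).map
          (fun contW => [PySem.List.pyGetD tokens ci "", contW])) = acc := by
      intro acc ci hci
      rw [PySem.List.mem_pyRange_one, PySem.List.len_eq] at hci
      rw [percenter_nil tokens _ ci (by omega) hn hci.1]
      simp
    rw [PySem.List.foldl_congr_mem _ _ (fun acc _ => acc) [] step]
    simp

theorem window_sample_changed : Claim_changed_window_sample := by
  unfold Claim_changed_window_sample; decide

theorem window_sample_tight : Claim_exact_window_sample := by
  intro tokens win_width _ hD
  obtain ⟨hh, hn⟩ := hD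
  rw [alt_eq_nil_of_neg tokens win_width (by omega)]
  unfold window_sample
  simp only [PySem.List.len_eq]
  rw [PySem.List.foldl_append_eq_flatMap]
  simp only [List.nil_append]
  intro hcon
  rw [List.flatMap_eq_nil_iff] at hcon
  have h0 : (0 : Int) ∈ PySem.List.pyRange 0 (tokens.length : Int) := by
    rw [PySem.List.mem_pyRange_one]; omega
  have hz := hcon 0 h0
  have hl : ((PySem.List.slice tokens (some (max (0 - PySem.Int.floordiv win_width 2) 0)) (some 0)
      ++ PySem.List.slice tokens (some (0 + 1)) (some (0 + PySem.Int.floordiv win_width 2 + 1))).map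
      (fun contW => [PySem.List.pyGetD tokens 0 "", contW])).length = 0 := by
    rw [hz]; rfl
  simp only [List.length_map, List.length_append, PySem.List.length_slice] at hl
  simp only [PySem.List.clampIdx] at hl
  revert hl
  split_ifs <;> omega
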